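-- pv_equiv track=rewrite | github.com/davidosland-lab/GSMT-Ver-813 | automatic_prediction_scheduler.py | _get_min_interval_minutes
-- ===== SOURCE A (Python) =====
-- from typing import Dict, List, Optional, Set, Tuple, Any
--
-- def _get_min_interval_minutes(intervals: List[str]) -> int:
--     """Get minimum interval in minutes from interval list."""
--     interval_map = {
--         '15m': 15, '30m': 30, '1h': 60, '2h': 120,
--         '4h': 240, '1d': 1440, '1w': 10080
--     }
--
--     min_minutes = float('inf')
--     for interval in intervals:
--         if interval in interval_map:
--             min_minutes = min(min_minutes, interval_map[interval])
--
--     return int(min_minutes) if min_minutes != float('inf') else 60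
-- ===== SOURCE B (Python) =====
-- def _get_min_interval_minutes(intervals):
--     """Get minimum interval in minutes from interval list."""
--     candidates = [('15m', 15), ('30m', 30), ('1h', 60), ('2h', 120),
--                   ('4h', 240), ('1d', 1440), ('1w', 10080)]
--     present = set(intervals)
--     return next((minutes for key, minutes in candidates if key in present), 60)
-- ===== Notes on version B (the rewrite author's own statement) =====
-- stated objective: idiomatic
-- what changed: Instead of scanning the input and accumulating a running float-inf minimum, B builds a set of the input once and walks the fixed candidate list in ascending-minutes order, returning the first candidate present (default 60) via next().
import Mathlib
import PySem

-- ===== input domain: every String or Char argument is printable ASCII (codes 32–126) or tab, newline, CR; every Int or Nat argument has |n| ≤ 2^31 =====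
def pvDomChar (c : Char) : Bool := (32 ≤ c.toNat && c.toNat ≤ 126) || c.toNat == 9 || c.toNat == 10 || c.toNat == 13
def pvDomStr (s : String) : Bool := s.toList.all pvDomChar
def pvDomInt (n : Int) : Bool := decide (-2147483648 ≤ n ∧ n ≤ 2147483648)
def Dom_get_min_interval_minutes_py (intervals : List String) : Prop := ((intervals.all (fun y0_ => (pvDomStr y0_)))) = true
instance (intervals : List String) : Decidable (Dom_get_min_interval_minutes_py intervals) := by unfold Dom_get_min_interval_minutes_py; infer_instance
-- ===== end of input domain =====

-- B replaces A's running minimum over the input with one set-build plus a first-hit scan of the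
-- fixed candidate list in ascending-minutes order (idiomatic; no speed claim).

-- ===== PORT A =====
-- A's dict literal, built in insertion order.
def pvIntervalMap : PySem.Dict String Int :=
  PySem.Dict.ofList [("15m", 15), ("30m", 30), ("1h", 60), ("2h", 120),
                     ("4h", 240), ("1d", 1440), ("1w", 10080)]

-- A's loop body. min_minutes starts at float('inf') and only ever holds inf or an int from the
-- map, so it is modeled as Option Int with none = inf (exact: min(inf, v) = v).
def pvStepA (acc : Option Int) (interval : String) : Option Int :=
  if pvIntervalMap.contains interval then
    match acc, pvIntervalMap.get? interval with
    | none, some v => some v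
    | some m, some v => some (min m v)
    | _, none => acc
  else acc

def get_min_interval_minutes_py (intervals : List String) : Int :=
  let min_minutes : Option Int := intervals.foldl pvStepA none
  -- int(min_minutes) if min_minutes != float('inf') else 60
  match min_minutes with
  | some v => v
  | none => 60

-- ===== PORT B =====
def get_min_interval_minutes_py_alt (intervals : List String) : Int :=
  let candidates : List (String × Int) := [("15m", 15), ("30m", 30), ("1h", 60), ("2h", 120),
                                           ("4h", 240), ("1d", 1440), ("1w", 10080)]
  let present : PySem.Set String := PySem.Set.ofList intervals
  -- next((minutes for key, minutes in candidates if key in present), 60)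
  match candidates.find? (fun kv => present.contains kv.1) with
  | some kv => kv.2
  | none => 60

-- ===== PRECONDITION & SPEC =====
def Spec_get_min_interval_minutes_py (intervals : List String) (out : Int) : Prop := out = get_min_interval_minutes_py_alt intervals
instance (intervals : List String) (out : Int) : Decidable (Spec_get_min_interval_minutes_py intervals out) := by unfold Spec_get_min_interval_minutes_py; infer_instance

-- ===== CLAIM (what is proved, stated in full; the proofs are below) =====
def Claim_equal_get_min_interval_minutes_py : Prop := ∀ (intervals : List String), Dom_get_min_interval_minutes_py intervals → Spec_get_min_interval_minutes_py intervals (get_min_interval_minutes_py intervals)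

-- ===== LEMMAS AND PROOFS =====

-- the minimum minutes among the candidate keys present, as a nested if over 7 membership booleans
def pvGOpt (b15 b30 b1h b2h b4h b1d b1w : Bool) : Option Int :=
  if b15 then some 15 else if b30 then some 30 else if b1h then some 60
  else if b2h then some 120 else if b4h then some 240 else if b1d then some 1440
  else if b1w then some 10080 else none

-- the minimum A's scan accumulates, as a structural recursion over the input
def pvM (xs : List String) : Option Int :=
  match xs with
  | [] => none
  | x :: rest =>
    match pvIntervalMap.get? x, pvM rest with
    | none, o => o
    | some v, none => some v
    | some v, some m => some (min v m)

lemma pvStepA_get (acc : Option Int) (x : String) :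
    pvStepA acc x = match pvIntervalMap.get? x, acc with
      | none, _ => acc
      | some v, none => some v
      | some v, some m => some (min m v) := by
  unfold pvStepA
  rw [PySem.Dict.contains_eq_isSome_get?]
  cases pvIntervalMap.get? x <;> cases acc <;> simp

lemma pvGet_none (x : String) (h15 : x ≠ "15m") (h30 : x ≠ "30m") (h1h : x ≠ "1h") (h2h : x ≠ "2h")
    (h4h : x ≠ "4h") (h1d : x ≠ "1d") (h1w : x ≠ "1w") : pvIntervalMap.get? x = none := by
  rw [show pvIntervalMap = PySem.Dict.mk [("15m", 15), ("30m", 30), ("1h", 60), ("2h", 120), ("4h", 240), ("1d", 1440), ("1w", 10080)] from rfl]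
  simp [PySem.Dict.get?_mk_cons, Ne.symm h15, Ne.symm h30, Ne.symm h1h, Ne.symm h2h,
        Ne.symm h4h, Ne.symm h1d, Ne.symm h1w, PySem.Dict.get?]

lemma pvFoldA_eq (xs : List String) : ∀ acc,
    xs.foldl pvStepA acc = match acc, pvM xs with
      | a, none => a
      | none, o => o
      | some a, some m => some (min a m) := by
  induction xs with
  | nil => intro acc; cases acc <;> rfl
  | cons x rest ih =>
    intro acc
    rw [List.foldl_cons, ih, pvStepA_get]
    show _ = (match acc, pvM (x :: rest) with
      | a, none => a | none, o => o | some a, some m => some (min a m))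
    rw [show pvM (x :: rest) = match pvIntervalMap.get? x, pvM rest with
        | none, o => o | some v, none => some v | some v, some m => some (min v m) from rfl]
    cases pvIntervalMap.get? x <;> cases acc <;> cases pvM rest <;> simp [min_assoc]

lemma pvM_eq_gOpt (xs : List String) :
    pvM xs = pvGOpt (xs.contains "15m") (xs.contains "30m") (xs.contains "1h")
      (xs.contains "2h") (xs.contains "4h") (xs.contains "1d") (xs.contains "1w") := by
  induction xs with
  | nil => rfl
  | cons x rest ih =>
    show (match pvIntervalMap.get? x, pvM rest with
      | none, o => o | some v, none => some v | some v, some m => some (min v m)) = _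
    rw [ih]
    by_cases hk15 : x = "15m"
    · subst hk15
      simp only [List.contains_cons]
      rw [show pvIntervalMap.get? "15m" = some 15 from rfl]
      generalize rest.contains "15m" = b1
      generalize rest.contains "30m" = b2
      generalize rest.contains "1h" = b3
      generalize rest.contains "2h" = b4
      generalize rest.contains "4h" = b5
      generalize rest.contains "1d" = b6
      generalize rest.contains "1w" = b7
      revert b1 b2 b3 b4 b5 b6 b7; decide
    by_cases hk30 : x = "30m"
    · subst hk30
      simp only [List.contains_cons]
      rw [show pvIntervalMap.get? "30m" = some 30 from rfl]
      generalize rest.contains "15m" = b1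
      generalize rest.contains "30m" = b2
      generalize rest.contains "1h" = b3
      generalize rest.contains "2h" = b4
      generalize rest.contains "4h" = b5
      generalize rest.contains "1d" = b6
      generalize rest.contains "1w" = b7
      revert b1 b2 b3 b4 b5 b6 b7; decide
    by_cases hk1h : x = "1h"
    · subst hk1h
      simp only [List.contains_cons]
      rw [show pvIntervalMap.get? "1h" = some 60 from rfl]
      generalize rest.contains "15m" = b1
      generalize rest.contains "30m" = b2
      generalize rest.contains "1h" = b3
      generalize rest.contains "2h" = b4
      generalize rest.contains "4h" = b5
      generalize rest.contains "1d" = b6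
      generalize rest.contains "1w" = b7
      revert b1 b2 b3 b4 b5 b6 b7; decide
    by_cases hk2h : x = "2h"
    · subst hk2h
      simp only [List.contains_cons]
      rw [show pvIntervalMap.get? "2h" = some 120 from rfl]
      generalize rest.contains "15m" = b1
      generalize rest.contains "30m" = b2
      generalize rest.contains "1h" = b3
      generalize rest.contains "2h" = b4
      generalize rest.contains "4h" = b5
      generalize rest.contains "1d" = b6
      generalize rest.contains "1w" = b7
      revert b1 b2 b3 b4 b5 b6 b7; decide
    by_cases hk4h : x = "4h"
    · subst hk4h
      simp only [List.contains_cons]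
      rw [show pvIntervalMap.get? "4h" = some 240 from rfl]
      generalize rest.contains "15m" = b1
      generalize rest.contains "30m" = b2
      generalize rest.contains "1h" = b3
      generalize rest.contains "2h" = b4
      generalize rest.contains "4h" = b5
      generalize rest.contains "1d" = b6
      generalize rest.contains "1w" = b7
      revert b1 b2 b3 b4 b5 b6 b7; decide
    by_cases hk1d : x = "1d"
    · subst hk1d
      simp only [List.contains_cons]
      rw [show pvIntervalMap.get? "1d" = some 1440 from rfl]
      generalize rest.contains "15m" = b1
      generalize rest.contains "30m" = b2
      generalize rest.contains "1h" = b3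
      generalize rest.contains "2h" = b4
      generalize rest.contains "4h" = b5
      generalize rest.contains "1d" = b6
      generalize rest.contains "1w" = b7
      revert b1 b2 b3 b4 b5 b6 b7; decide
    by_cases hk1w : x = "1w"
    · subst hk1w
      simp only [List.contains_cons]
      rw [show pvIntervalMap.get? "1w" = some 10080 from rfl]
      generalize rest.contains "15m" = b1
      generalize rest.contains "30m" = b2
      generalize rest.contains "1h" = b3
      generalize rest.contains "2h" = b4
      generalize rest.contains "4h" = b5
      generalize rest.contains "1d" = b6
      generalize rest.contains "1w" = b7
      revert b1 b2 b3 b4 b5 b6 b7; decide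
    rw [pvGet_none x hk15 hk30 hk1h hk2h hk4h hk1d hk1w]
    simp [List.contains_cons, Ne.symm hk15, Ne.symm hk30, Ne.symm hk1h, Ne.symm hk2h, Ne.symm hk4h, Ne.symm hk1d, Ne.symm hk1w]

lemma pvAlt_eq_gOpt (xs : List String) :
    get_min_interval_minutes_py_alt xs =
      (pvGOpt (xs.contains "15m") (xs.contains "30m") (xs.contains "1h")
        (xs.contains "2h") (xs.contains "4h") (xs.contains "1d") (xs.contains "1w")).getD 60 := by
  have hc : ∀ a : String, (PySem.Set.ofList xs).contains a = xs.contains a := by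
    intro a; simp [PySem.Set.mem_ofList]
  unfold get_min_interval_minutes_py_alt
  simp only [List.find?, hc]
  generalize xs.contains "15m" = b1
  generalize xs.contains "30m" = b2
  generalize xs.contains "1h" = b3
  generalize xs.contains "2h" = b4
  generalize xs.contains "4h" = b5
  generalize xs.contains "1d" = b6
  generalize xs.contains "1w" = b7
  revert b1 b2 b3 b4 b5 b6 b7; decide

-- ===== VERDICT (by name: the statement is the Claim_ definition above) =====
theorem get_min_interval_minutes_py_spec : Claim_equal_get_min_interval_minutes_py := by
  intro intervals _
  unfold Spec_get_min_interval_minutes_py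
  rw [pvAlt_eq_gOpt]
  unfold get_min_interval_minutes_py
  rw [pvFoldA_eq intervals none, pvM_eq_gOpt]
  generalize intervals.contains "15m" = b1
  generalize intervals.contains "30m" = b2
  generalize intervals.contains "1h" = b3
  generalize intervals.contains "2h" = b4
  generalize intervals.contains "4h" = b5
  generalize intervals.contains "1d" = b6
  generalize intervals.contains "1w" = b7
  revert b1 b2 b3 b4 b5 b6 b7; decide
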